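-- pv_equiv track=rewrite | github.com/quaat/midi_chords | main.py | _ensure_strictly_ascending_unique
-- ===== SOURCE A (Python) =====
-- from typing import Dict, Iterable, List, Optional, Sequence, Tuple
--
-- def _ensure_strictly_ascending_unique(notes: Sequence[int]) -> List[int]:
--     out: List[int] = []
--     seen = set()
--     for n in sorted(notes):
--         nn = n
--         # Avoid duplicates by lifting by octaves if needed.
--         while nn in seen:
--             nn += 12
--         out.append(nn)
--         seen.add(nn)
--     # Enforce strict ascending if duplicates forced octaves might have broken order.
--     out_sorted = sorted(out)
--     for i in range(1, len(out_sorted)):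
--         if out_sorted[i] <= out_sorted[i - 1]:
--             out_sorted[i] = out_sorted[i - 1] + 1
--     return out_sorted
-- ===== SOURCE B (Python) =====
-- def _ensure_strictly_ascending_unique(notes):
--     # union-find style "next free slot" pointers: occupied value -> next candidate
--     # slot in its +12 chain, with path compression.
--     nxt = {}
--     out = []
--     for n in sorted(notes):
--         r = n
--         while r in nxt:           # find the first free slot n, n+12, n+24, ...
--             r = nxt[r]
--         v = n
--         while v != r:             # path compression: repoint the walked slots at r
--             v, nxt[v] = nxt[v], r
--         nxt[r] = r + 12           # occupy r
--         out.append(r)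
--     out.sort()
--     res = []                      # enforce strict ascent by +1 bumps
--     for v in out:
--         res.append(v if not res or v > res[-1] else res[-1] + 1)
--     return res
-- ===== Notes on version B (the rewrite author's own statement) =====
-- stated objective: faster
-- what changed: Replaces A's repeated 'while nn in seen: nn += 12' set-scan with union-find style next-free-slot pointers (a dict with path compression), and replaces A's in-place index-loop bump pass with a single accumulate pass.
import Mathlib
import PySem

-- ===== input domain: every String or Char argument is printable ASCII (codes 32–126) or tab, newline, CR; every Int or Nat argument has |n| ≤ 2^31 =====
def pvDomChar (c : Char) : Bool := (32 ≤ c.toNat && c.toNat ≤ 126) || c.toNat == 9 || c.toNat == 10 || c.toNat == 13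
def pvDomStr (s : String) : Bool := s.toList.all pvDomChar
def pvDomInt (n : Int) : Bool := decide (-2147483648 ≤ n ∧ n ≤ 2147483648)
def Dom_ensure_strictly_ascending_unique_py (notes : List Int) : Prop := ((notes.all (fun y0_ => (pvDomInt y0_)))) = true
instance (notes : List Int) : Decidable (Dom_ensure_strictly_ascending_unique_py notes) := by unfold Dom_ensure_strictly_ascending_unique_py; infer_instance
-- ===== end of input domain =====

-- B replaces A's repeated +12 membership scanning with union-find style next-free-slot
-- pointers (path compression) and a single accumulate pass for the +1 bumps; measurably
-- faster on duplicate-heavy inputs.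

-- ===== PORT A =====
-- 'while nn in seen: nn += 12'; fuel (seen.length + 1) only makes the loop total —
-- it is proved sufficient below (each iteration passes a distinct member of seen).
def liftA (seen : List Int) (nn : Int) : Nat → Int
  | 0 => nn
  | fuel+1 => if nn ∈ seen then liftA seen (nn + 12) fuel else nn

-- body of 'for n in sorted(notes)': append the lifted note, add it to seen
def stepA (st : List Int × List Int) (n : Int) : List Int × List Int :=
  let nn := liftA st.2 n (st.2.length + 1)
  (st.1 ++ [nn], PySem.Set.add st.2 nn)

-- body of 'for i in range(1, len(out_sorted))'
def fixA (a : List Int) (i : Int) : List Int :=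
  if PySem.List.pyGetD a i 0 ≤ PySem.List.pyGetD a (i - 1) 0 then
    PySem.List.pySetD a i (PySem.List.pyGetD a (i - 1) 0 + 1)
  else a

def ensure_strictly_ascending_unique_py (notes : List Int) : List Int :=
  let p1 := (PySem.List.sorted notes (fun x => x) false).foldl stepA ([], [])
  let out_sorted := PySem.List.sorted p1.1 (fun x => x) false
  (PySem.List.pyRange 1 (out_sorted.length : Int) 1).foldl fixA out_sorted

-- ===== PORT B =====
-- 'while r in nxt: r = nxt[r]'; fuel (nxt.size + 1) only makes the walk total —
-- proved sufficient below (the chain visits distinct keys of nxt).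
def walkB (nxt : PySem.Dict Int Int) : Int → Nat → Int
  | r, 0 => r
  | r, fuel+1 =>
    match nxt.get? r with
    | none => r
    | some w => walkB nxt w fuel

-- 'while v != r: v, nxt[v] = nxt[v], r' (path compression); same fuel remark.
def compressB : PySem.Dict Int Int → Int → Int → Nat → PySem.Dict Int Int
  | nxt, _, _, 0 => nxt
  | nxt, v, r, fuel+1 =>
    if v = r then nxt
    else
      match nxt.get? v with
      | none => nxt
      | some w => compressB (nxt.insert v r) w r fuel

-- body of 'for n in sorted(notes)': find the free slot, compress, occupy it
def stepB (st : List Int × PySem.Dict Int Int) (n : Int) : List Int × PySem.Dict Int Int :=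
  let r := walkB st.2 n (st.2.size + 1)
  let nxt := compressB st.2 n r (st.2.size + 1)
  (st.1 ++ [r], nxt.insert r (r + 12))

-- body of 'for v in out: res.append(v if not res or v > res[-1] else res[-1] + 1)'
def bumpB (res : List Int) (v : Int) : List Int :=
  res ++ [if res = [] then v
          else if PySem.List.pyGetD res (-1) 0 < v then v
          else PySem.List.pyGetD res (-1) 0 + 1]

def ensure_strictly_ascending_unique_py_alt (notes : List Int) : List Int :=
  let p1 := (PySem.List.sorted notes (fun x => x) false).foldl stepB ([], PySem.Dict.empty)
  let out_sorted := PySem.List.sorted p1.1 (fun x => x) false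
  out_sorted.foldl bumpB []

-- ===== PRECONDITION & SPEC =====
def Spec_ensure_strictly_ascending_unique_py (notes : List Int) (out : List Int) : Prop := out = ensure_strictly_ascending_unique_py_alt notes
instance (notes : List Int) (out : List Int) : Decidable (Spec_ensure_strictly_ascending_unique_py notes out) := by unfold Spec_ensure_strictly_ascending_unique_py; infer_instance

-- ===== CLAIM (what is proved, stated in full; the proofs are below) =====
def Claim_equal_ensure_strictly_ascending_unique_py : Prop := ∀ (notes : List Int), Dom_ensure_strictly_ascending_unique_py notes → Spec_ensure_strictly_ascending_unique_py notes (ensure_strictly_ascending_unique_py notes)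

-- ===== LEMMAS AND PROOFS =====

-- the count of seen-elements ≥ a strictly drops when the threshold passes a member a
lemma filter_ge_len_lt (seen : List Int) (a b : Int) (ha : a ∈ seen) (hab : a < b) :
    (seen.filter (fun x => decide (b ≤ x))).length < (seen.filter (fun x => decide (a ≤ x))).length := by
  have h1 : seen.filter (fun x => decide (b ≤ x)) = (seen.filter (fun x => decide (a ≤ x))).filter (fun x => decide (b ≤ x)) := by
    rw [List.filter_filter]
    apply List.filter_congr
    intro x _
    by_cases h : b ≤ x <;> simp [h] <;> omega
  rw [h1]
  apply List.length_filter_lt_length_iff_exists.mpr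
  exact ⟨a, by simp [ha], by simp; omega⟩

-- mathematical first-free-slot function: smallest a + 12k (k ≥ 0) not in seen
def ff (seen : List Int) (n : Int) : Int :=
  if h : n ∈ seen then ff seen (n + 12) else n
termination_by (seen.filter (fun x => decide (n ≤ x))).length
decreasing_by exact filter_ge_len_lt seen n (n + 12) h (by omega)

-- 'the slots v, v+12, …, r-12 are all occupied' (r = v + 12m)
def Covered (seen : List Int) (v r : Int) : Prop :=
  ∃ m : Nat, r = v + 12 * (m : Int) ∧ ∀ j : Nat, j < m → v + 12 * (j : Int) ∈ seen

-- the relation between A's seen-set and B's pointer dictionary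
def InvAB (seen : List Int) (nxt : PySem.Dict Int Int) : Prop :=
  (∀ v, (nxt.get? v).isSome ↔ v ∈ seen) ∧
  (∀ v w, nxt.get? v = some w → v < w ∧ Covered seen v w) ∧
  nxt.size = seen.length

lemma ff_of_not_mem (seen : List Int) (n : Int) (h : n ∉ seen) : ff seen n = n := by
  rw [ff]; simp [h]

lemma ff_spec (seen : List Int) (n : Int) : ff seen n ∉ seen ∧ Covered seen n (ff seen n) := by
  induction n using ff.induct seen with
  | case2 n h =>
    rw [ff_of_not_mem seen n h]
    exact ⟨h, 0, by simp, by omega⟩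
  | case1 n h ih =>
    have he : ff seen n = ff seen (n + 12) := by rw [ff]; simp [h]
    refine ⟨he ▸ ih.1, ?_⟩
    obtain ⟨m, hm, hj⟩ := ih.2
    refine ⟨m + 1, by push_cast; omega, ?_⟩
    intro j hjm
    cases j with
    | zero => simpa using h
    | succ k =>
      have := hj k (by omega)
      have harith : n + 12 * ((k + 1 : Nat) : Int) = n + 12 + 12 * (k : Int) := by push_cast; ring
      rw [harith]; exact this

lemma ff_skip (seen : List Int) (n : Int) (m : Nat)
    (h : ∀ j : Nat, j < m → n + 12 * (j : Int) ∈ seen) :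
    ff seen n = ff seen (n + 12 * (m : Int)) := by
  induction m generalizing n with
  | zero => simp
  | succ k ih =>
    have h0 : n ∈ seen := by simpa using h 0 (by omega)
    have he : ff seen n = ff seen (n + 12) := by rw [ff]; simp [h0]
    rw [he, ih (n + 12) (fun j hj => by
      have := h (j + 1) (by omega)
      have harith : n + 12 * ((j + 1 : Nat) : Int) = n + 12 + 12 * (j : Int) := by push_cast; ring
      rw [harith] at this; exact this)]
    congr 1; push_cast; ring

lemma liftA_eq_ff (seen : List Int) (n : Int) (fuel : Nat)
    (h : (seen.filter (fun x => decide (n ≤ x))).length < fuel) :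
    liftA seen n fuel = ff seen n := by
  induction fuel generalizing n with
  | zero => omega
  | succ f ih =>
    by_cases hn : n ∈ seen
    · have he : ff seen n = ff seen (n + 12) := by rw [ff]; simp [hn]
      rw [liftA, if_pos hn, he]
      exact ih (n + 12) (by
        have := filter_ge_len_lt seen n (n + 12) hn (by omega)
        omega)
    · rw [liftA, if_neg hn, ff_of_not_mem seen n hn]

lemma walkB_eq_ff (seen : List Int) (nxt : PySem.Dict Int Int) (n : Int) (fuel : Nat)
    (hInv : InvAB seen nxt)
    (h : (seen.filter (fun x => decide (n ≤ x))).length < fuel) :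
    walkB nxt n fuel = ff seen n := by
  induction fuel generalizing n with
  | zero => omega
  | succ f ih =>
    rw [walkB]
    cases hg : nxt.get? n with
    | none =>
      have hn : n ∉ seen := by
        rw [← hInv.1 n, hg]; simp
      rw [ff_of_not_mem seen n hn]
    | some w =>
      obtain ⟨hlt, m, hm, hj⟩ := hInv.2.1 n w hg
      have hm1 : 1 ≤ m := by by_contra hc; push_cast [Nat.lt_one_iff.mp (by omega : m < 1)] at hm; omega
      have hn : n ∈ seen := by simpa using hj 0 (by omega)
      rw [ff_skip seen n m hj, ← hm]
      exact ih w (by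
        have := filter_ge_len_lt seen n w hn hlt
        omega)

lemma compressB_inv (seen : List Int) (r : Int) (hr : r ∉ seen) :
    ∀ (fuel : Nat) (nxt : PySem.Dict Int Int) (v : Int), InvAB seen nxt → Covered seen v r →
    InvAB seen (compressB nxt v r fuel) := by
  intro fuel
  induction fuel with
  | zero => intro nxt v hInv _; exact hInv
  | succ f ih =>
    intro nxt v hInv hcov
    rw [compressB]
    by_cases hvr : v = r
    · simpa [hvr] using hInv
    · rw [if_neg hvr]
      cases hg : nxt.get? v with
      | none => exact hInv
      | some w =>
        obtain ⟨m, hm, hj⟩ := hcov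
        have hm1 : 1 ≤ m := by
          by_contra hc
          push_cast [Nat.lt_one_iff.mp (by omega : m < 1)] at hm
          omega
        obtain ⟨hvw, m', hm', hj'⟩ := hInv.2.1 v w hg
        have hmm : m' ≤ m := by
          by_contra hc
          exact hr (by simpa [hm] using hj' m (by omega))
        have hInv' : InvAB seen (nxt.insert v r) := by
          refine ⟨?_, ?_, ?_⟩
          · intro u
            rw [PySem.Dict.get?_insert]
            by_cases hu : u = v
            · subst hu
              have hmem : (nxt.get? u).isSome := by rw [hg]; rfl
              simp [(hInv.1 u).mp hmem]
            · rw [if_neg hu]; exact hInv.1 u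
          · intro u val hval
            rw [PySem.Dict.get?_insert] at hval
            by_cases hu : u = v
            · rw [if_pos hu] at hval
              cases hval
              subst hu
              exact ⟨by omega, m, hm, hj⟩
            · rw [if_neg hu] at hval
              exact hInv.2.1 u val hval
          · rw [PySem.Dict.size_insert]
            have : nxt.contains v = true := by
              rw [PySem.Dict.contains_eq_isSome_get?, hg]; rfl
            rw [if_pos this]
            exact hInv.2.2
        refine ih (nxt.insert v r) w hInv' ⟨m - m', ?_, ?_⟩
        · rw [hm, hm']; push_cast [Nat.cast_sub hmm]; ring
        · intro j hjlt
          have := hj (m' + j) (by omega)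
          have harith : w + 12 * (j : Int) = v + 12 * ((m' + j : Nat) : Int) := by
            rw [hm']; push_cast; ring
          rw [harith]; exact this

lemma occupy_inv (seen : List Int) (nxt : PySem.Dict Int Int) (r : Int)
    (hInv : InvAB seen nxt) (hr : r ∉ seen) :
    InvAB (PySem.Set.add seen r) (nxt.insert r (r + 12)) := by
  have hcr : nxt.contains r = false := by
    rw [PySem.Dict.contains_eq_isSome_get?]
    have : ¬ (nxt.get? r).isSome := by rw [hInv.1 r]; exact hr
    simpa using this
  refine ⟨?_, ?_, ?_⟩
  · intro u
    rw [PySem.Dict.get?_insert]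
    by_cases hu : u = r
    · simp [hu, PySem.Set.mem_add]
    · rw [if_neg hu, PySem.Set.mem_add]
      simp only [hu, or_false]
      exact hInv.1 u
  · intro u val hval
    rw [PySem.Dict.get?_insert] at hval
    by_cases hu : u = r
    · rw [if_pos hu] at hval
      cases hval
      subst hu
      refine ⟨by omega, 1, by push_cast; ring, ?_⟩
      intro j hj
      interval_cases j
      simp [PySem.Set.mem_add]
    · rw [if_neg hu] at hval
      obtain ⟨hlt, m, hm, hj⟩ := hInv.2.1 u val hval
      exact ⟨hlt, m, hm, fun j hjm => (PySem.Set.mem_add _ _ _).mpr (Or.inl (hj j hjm))⟩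
  · rw [PySem.Dict.size_insert, if_neg (by simp [hcr])]
    have hadd : PySem.Set.add seen r = seen ++ [r] := by
      simp [PySem.Set.add, hr]
    rw [hadd]
    simp [hInv.2.2]

lemma phase1 (l : List Int) :
    ∀ (out seen : List Int) (nxt : PySem.Dict Int Int), InvAB seen nxt →
    (l.foldl stepA (out, seen)).1 = (l.foldl stepB (out, nxt)).1 ∧
    InvAB (l.foldl stepA (out, seen)).2 (l.foldl stepB (out, nxt)).2 := by
  induction l with
  | nil => intro out seen nxt h; exact ⟨rfl, h⟩
  | cons n t ih =>
    intro out seen nxt hInv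
    have hA : liftA seen n (seen.length + 1) = ff seen n := by
      apply liftA_eq_ff
      have := List.length_filter_le (fun x => decide (n ≤ x)) seen
      omega
    have hB : walkB nxt n (nxt.size + 1) = ff seen n := by
      apply walkB_eq_ff seen nxt n _ hInv
      have := List.length_filter_le (fun x => decide (n ≤ x)) seen
      rw [hInv.2.2]
      omega
    have hff := ff_spec seen n
    have hInv' : InvAB seen (compressB nxt n (ff seen n) (nxt.size + 1)) :=
      compressB_inv seen (ff seen n) hff.1 (nxt.size + 1) nxt n hInv hff.2
    have hInv'' := occupy_inv seen _ (ff seen n) hInv' hff.1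
    have hmain := ih (out ++ [ff seen n]) (PySem.Set.add seen (ff seen n)) _ hInv''
    simpa [stepA, stepB, hA, hB] using hmain

lemma bumpB_length (m : List Int) : ∀ res : List Int, (m.foldl bumpB res).length = res.length + m.length := by
  induction m with
  | nil => intro res; simp
  | cons v t ih =>
    intro res
    simp only [List.foldl_cons]
    rw [ih]
    simp [bumpB]
    omega

lemma phase2_aux (l : List Int) : ∀ k : Nat, k ≤ l.length →
    (PySem.List.pyRange 1 (k : Int) 1).foldl fixA l = (l.take k).foldl bumpB [] ++ l.drop k := by
  intro k
  induction k with
  | zero => intro _; rw [PySem.List.pyRange_one_eq_nil (by omega)]; simp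
  | succ k ih =>
    intro hk1
    by_cases hk0 : k = 0
    · subst hk0
      rw [show (((0:Nat)+1 : Nat) : Int) = (1:Int) by norm_num,
          PySem.List.pyRange_one_eq_nil (by omega)]
      cases l with
      | nil => simp at hk1
      | cons x t => simp [bumpB]
    · have hk : 1 ≤ k := by omega
      have hklen : k < l.length := by omega
      have hsplit : PySem.List.pyRange 1 ((k+1 : Nat) : Int) 1
          = PySem.List.pyRange 1 (k : Int) 1 ++ [(k : Int)] := by
        push_cast
        exact PySem.List.pyRange_one_succ_right (by exact_mod_cast hk)
      rw [hsplit, List.foldl_append, ih (by omega)]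
      set res := (l.take k).foldl bumpB [] with hres
      have hlen : res.length = k := by
        rw [hres, bumpB_length]
        simp [List.length_take]
        omega
      have hne : res ≠ [] := by
        intro h; rw [h] at hlen; simp at hlen; omega
      have hdrop : l.drop k = l[k] :: l.drop (k+1) := List.drop_eq_getElem_cons hklen
      have htake : l.take (k+1) = l.take k ++ [l[k]] := by
        rw [List.take_succ]
        simp [List.getElem?_eq_getElem hklen]
      have hgetk : PySem.List.pyGetD (res ++ l.drop k) (k : Int) 0 = l[k] := by
        rw [PySem.List.pyGetD_natCast]
        have hq : (res ++ l.drop k)[(k : Nat)]? = some l[k] := by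
          rw [List.getElem?_append_right (by omega), hdrop]
          simp [hlen]
        simp [List.getD_eq_getElem?_getD, hq]
      have hgetk1 : PySem.List.pyGetD (res ++ l.drop k) ((k : Int) - 1) 0
          = res.getLast hne := by
        have hidx : (k : Int) - 1 = ((k - 1 : Nat) : Int) := by
          push_cast [Nat.cast_sub hk]
          ring
        rw [hidx, PySem.List.pyGetD_natCast]
        have h2 : res.getLast hne = res[k-1]'(by omega) := by
          rw [List.getLast_eq_getElem]
          congr 1
          omega
        have hq : (res ++ l.drop k)[(k - 1 : Nat)]? = some (res[k-1]'(by omega)) := by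
          rw [List.getElem?_append_left (by omega)]
          exact List.getElem?_eq_getElem _
        rw [h2]
        simp [List.getD_eq_getElem?_getD, hq]
      have hset : ∀ v : Int, PySem.List.pySetD (res ++ l.drop k) (k : Int) v
          = res ++ v :: l.drop (k+1) := by
        intro v
        rw [PySem.List.pySetD_natCast, List.set_append, if_neg (by omega)]
        have h0 : k - res.length = 0 := by omega
        rw [h0, hdrop, List.set_cons_zero]
      have hrhs : (l.take (k+1)).foldl bumpB []
          = res ++ [if res.getLast hne < l[k] then l[k] else res.getLast hne + 1] := by
        have hneg : PySem.List.pyGetD res (-1) 0 = res.getLast hne := by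
          rw [PySem.List.pyGetD_neg_one]
        rw [htake, List.foldl_append, List.foldl_cons, List.foldl_nil, ← hres]
        simp [bumpB, hne, hneg]
      rw [hrhs, List.foldl_cons, List.foldl_nil]
      unfold fixA
      rw [hgetk, hgetk1]
      by_cases hcmp : l[k] ≤ res.getLast hne
      · rw [if_pos hcmp, hset, if_neg (by omega)]
        rw [List.append_assoc, List.singleton_append]
      · rw [if_neg hcmp, if_pos (by omega)]
        rw [hdrop, List.append_assoc, List.singleton_append]

lemma phase2 (l : List Int) :
    (PySem.List.pyRange 1 (l.length : Int) 1).foldl fixA l = l.foldl bumpB [] := by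
  have := phase2_aux l l.length (le_refl _)
  simpa using this

-- ===== VERDICT (by name: the statement is the Claim_ definition above) =====
theorem ensure_strictly_ascending_unique_py_spec : Claim_equal_ensure_strictly_ascending_unique_py := by
  intro notes _
  unfold Spec_ensure_strictly_ascending_unique_py
  simp only [ensure_strictly_ascending_unique_py, ensure_strictly_ascending_unique_py_alt]
  have h0 : InvAB [] PySem.Dict.empty := by
    refine ⟨?_, ?_, ?_⟩ <;> simp [PySem.Dict.get?_empty, PySem.Dict.size_empty]
  have h := phase1 (PySem.List.sorted notes (fun x => x) false) [] [] PySem.Dict.empty h0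
  rw [h.1, phase2]
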